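-- pv_equiv track=rewrite | github.com/SmallConcern/python_self_study | algorithms/misc/n_queen.py | is_threatened_square
-- ===== SOURCE A (Python) =====
-- def is_threatened_square(positions, row, col):
--     diag_1 = row + col
--     diag_2 = row - col
--     for pos_row, pos_col in positions:
--         if pos_row + pos_col == diag_1 or \
--             pos_row - pos_col == diag_2 or \
--             row == pos_row or \
--             col == pos_col:
--             return True
--     return False
-- ===== SOURCE B (Python) =====
-- def is_threatened_square(positions, row, col):
--     rows = {pos_row for pos_row, pos_col in positions}
--     cols = {pos_col for pos_row, pos_col in positions}
--     diag_sums = {pos_row + pos_col for pos_row, pos_col in positions}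
--     diag_diffs = {pos_row - pos_col for pos_row, pos_col in positions}
--     return row in rows or col in cols or row + col in diag_sums or row - col in diag_diffs
-- ===== Notes on version B (the rewrite author's own statement) =====
-- stated objective: alternative
-- what changed: B precomputes the four threatened lines (rows, columns, both diagonal families) as sets in separate comprehension passes and answers with four membership tests, instead of A's single scan that checks all four conditions per queen with an early return.
import Mathlib
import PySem

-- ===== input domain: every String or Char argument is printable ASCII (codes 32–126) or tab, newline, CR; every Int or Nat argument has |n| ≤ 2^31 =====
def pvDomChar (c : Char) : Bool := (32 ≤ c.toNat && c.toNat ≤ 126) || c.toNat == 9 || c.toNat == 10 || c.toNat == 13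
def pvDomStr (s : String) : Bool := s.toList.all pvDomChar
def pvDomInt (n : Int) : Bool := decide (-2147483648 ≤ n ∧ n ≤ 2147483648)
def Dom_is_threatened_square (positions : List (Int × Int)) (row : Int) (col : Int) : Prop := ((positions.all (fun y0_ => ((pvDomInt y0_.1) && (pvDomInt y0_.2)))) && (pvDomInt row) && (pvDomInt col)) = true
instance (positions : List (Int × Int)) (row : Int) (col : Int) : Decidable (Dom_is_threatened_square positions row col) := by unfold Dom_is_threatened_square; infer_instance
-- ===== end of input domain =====

-- B replaces A's per-queen scan by four precomputed line-index sets with membership tests (alternative decomposition, same cost).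
-- ===== PORT A =====
-- A: single scan; per queen check both diagonals, the row and the column, early return.
def isThreatLoop (diag1 diag2 row col : Int) : List (Int × Int) → Bool
  | [] => false
  | (pr, pc) :: rest =>
      if pr + pc == diag1 || pr - pc == diag2 || row == pr || col == pc then true
      else isThreatLoop diag1 diag2 row col rest

def is_threatened_square (positions : List (Int × Int)) (row : Int) (col : Int) : Bool :=
  let diag1 := row + col
  let diag2 := row - col
  isThreatLoop diag1 diag2 row col positions

-- ===== PORT B =====
-- B: precompute the threatened lines as four sets, then four membership tests.
def is_threatened_square_alt (positions : List (Int × Int)) (row : Int) (col : Int) : Bool :=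
  let rows : PySem.Set Int := PySem.Set.ofList (positions.map (fun p => p.1))
  let cols : PySem.Set Int := PySem.Set.ofList (positions.map (fun p => p.2))
  let diagSums : PySem.Set Int := PySem.Set.ofList (positions.map (fun p => p.1 + p.2))
  let diagDiffs : PySem.Set Int := PySem.Set.ofList (positions.map (fun p => p.1 - p.2))
  PySem.Set.contains rows row || PySem.Set.contains cols col ||
    PySem.Set.contains diagSums (row + col) || PySem.Set.contains diagDiffs (row - col)

-- ===== PRECONDITION & SPEC =====
def Spec_is_threatened_square (positions : List (Int × Int)) (row : Int) (col : Int) (out : Bool) : Prop := out = is_threatened_square_alt positions row col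
instance (positions : List (Int × Int)) (row : Int) (col : Int) (out : Bool) : Decidable (Spec_is_threatened_square positions row col out) := by unfold Spec_is_threatened_square; infer_instance

-- ===== CLAIM (what is proved, stated in full; the proofs are below) =====
def Claim_equal_is_threatened_square : Prop := ∀ (positions : List (Int × Int)) (row : Int) (col : Int), Dom_is_threatened_square positions row col → Spec_is_threatened_square positions row col (is_threatened_square positions row col)

-- ===== LEMMAS AND PROOFS =====

-- ===== VERDICT (by name: the statement is the Claim_ definition above) =====
theorem isThreatLoop_eq_any (d1 d2 r c : Int) (ps : List (Int × Int)) :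
    isThreatLoop d1 d2 r c ps =
      ps.any (fun p => p.1 + p.2 == d1 || p.1 - p.2 == d2 || r == p.1 || c == p.2) := by
  induction ps with
  | nil => rfl
  | cons p rest ih =>
      obtain ⟨pr, pc⟩ := p
      simp only [isThreatLoop, List.any_cons, ← ih]
      split_ifs with h
      · simp [h]
      · simp only [Bool.not_eq_true] at h
        simp [h]

theorem alt_eq_any (ps : List (Int × Int)) (r c : Int) :
    is_threatened_square_alt ps r c =
      ps.any (fun p => p.1 + p.2 == r + c || p.1 - p.2 == r - c || r == p.1 || c == p.2) := by
  rw [Bool.eq_iff_iff]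
  simp only [is_threatened_square_alt, Bool.or_eq_true, PySem.Set.contains_iff,
    PySem.Set.mem_ofList, List.mem_map, List.any_eq_true, beq_iff_eq]
  constructor
  · rintro (((⟨p, hp, h⟩ | ⟨p, hp, h⟩) | ⟨p, hp, h⟩) | ⟨p, hp, h⟩) <;>
      exact ⟨p, hp, by omega⟩
  · rintro ⟨p, hp, ((h | h) | h) | h⟩
    · exact Or.inl (Or.inr ⟨p, hp, by omega⟩)
    · exact Or.inr ⟨p, hp, by omega⟩
    · exact Or.inl (Or.inl (Or.inl ⟨p, hp, by omega⟩))
    · exact Or.inl (Or.inl (Or.inr ⟨p, hp, by omega⟩))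

theorem is_threatened_square_spec : Claim_equal_is_threatened_square := by
  intro ps r c _
  unfold Spec_is_threatened_square
  rw [is_threatened_square, isThreatLoop_eq_any, alt_eq_any]
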